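-- pv_equiv track=rewrite | github.com/wseungjin/SLRParser | lexical_analyzer.py | isType
-- ===== SOURCE A (Python) =====
-- def isType(stack):   #1. 자료형
--   state = 'T0'
--   for i in stack:
--     if i=='i' and state == 'T0':
--       state = 'T1'
--     elif i=='c' and state == 'T0':
--       state = 'T2'
--     elif i=='b' and state == 'T0':
--       state = 'T3'
--     elif i=='f' and state == 'T0':
--       state = 'T4'
--     elif i=='n' and state == 'T1':
--       state = 'T5'
--     elif i=='t' and state == 'T5':
--       state = 'T13'
--     elif i=='h' and state == 'T2':
--       state = 'T6'
--     elif i=='a' and state == 'T6':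
--       state = 'T9'
--     elif i=='r' and state == 'T9':
--       state = 'T13'
--     elif i=='o' and state == 'T3':
--       state = 'T7'
--     elif i=='o' and state =='T7':
--       state = 'T10'
--     elif i== 'l' and state =='T10':
--       state = 'T13'
--     elif i== 'l' and state =='T4':
--       state = 'T8'
--     elif i== 'o' and state =='T8':
--       state = 'T11'
--     elif i== 'a' and state =='T11':
--       state = 'T12'
--     elif i== 't' and state =='T12':
--       state = 'T13'
--     else:
--       state = 'false'
--       break
--
--   if state == 'T13':
--     return True
--   else:
--     return False
-- ===== SOURCE B (Python) =====
-- def isType(stack):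
--     return list(stack) in (['i', 'n', 't'],
--                            ['c', 'h', 'a', 'r'],
--                            ['b', 'o', 'o', 'l'],
--                            ['f', 'l', 'o', 'a', 't'])
-- ===== Notes on version B (the rewrite author's own statement) =====
-- stated objective: simpler
-- what changed: Replaced the hand-written 14-state DFA loop with a direct element-wise comparison of the input against the four literal keyword spellings.
import Mathlib
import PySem

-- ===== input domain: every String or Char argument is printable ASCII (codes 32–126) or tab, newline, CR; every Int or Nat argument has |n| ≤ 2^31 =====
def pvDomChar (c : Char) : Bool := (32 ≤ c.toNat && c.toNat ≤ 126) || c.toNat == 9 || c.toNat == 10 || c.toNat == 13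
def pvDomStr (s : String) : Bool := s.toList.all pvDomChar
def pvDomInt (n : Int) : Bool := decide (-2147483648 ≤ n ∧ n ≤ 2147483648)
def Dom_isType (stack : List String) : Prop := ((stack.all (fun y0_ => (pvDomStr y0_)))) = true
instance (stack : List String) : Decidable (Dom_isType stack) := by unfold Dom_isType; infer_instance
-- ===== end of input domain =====

-- B replaces A's 14-state DFA loop by a direct comparison with the four literal keyword spellings (objective: simpler).

-- ===== PORT A =====
-- the for-loop with `break`: each else-branch sets state to "false" and stops
def isTypeLoop : List String → String → String
  | [], state => state
  | i :: rest, state =>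
    if i == "i" && state == "T0" then isTypeLoop rest "T1"
    else if i == "c" && state == "T0" then isTypeLoop rest "T2"
    else if i == "b" && state == "T0" then isTypeLoop rest "T3"
    else if i == "f" && state == "T0" then isTypeLoop rest "T4"
    else if i == "n" && state == "T1" then isTypeLoop rest "T5"
    else if i == "t" && state == "T5" then isTypeLoop rest "T13"
    else if i == "h" && state == "T2" then isTypeLoop rest "T6"
    else if i == "a" && state == "T6" then isTypeLoop rest "T9"
    else if i == "r" && state == "T9" then isTypeLoop rest "T13"
    else if i == "o" && state == "T3" then isTypeLoop rest "T7"
    else if i == "o" && state == "T7" then isTypeLoop rest "T10"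
    else if i == "l" && state == "T10" then isTypeLoop rest "T13"
    else if i == "l" && state == "T4" then isTypeLoop rest "T8"
    else if i == "o" && state == "T8" then isTypeLoop rest "T11"
    else if i == "a" && state == "T11" then isTypeLoop rest "T12"
    else if i == "t" && state == "T12" then isTypeLoop rest "T13"
    else "false"

def isType (stack : List String) : Bool :=
  if isTypeLoop stack "T0" == "T13" then true else false

-- ===== PORT B =====
def isType_alt (stack : List String) : Bool :=
  stack == ["i", "n", "t"] || stack == ["c", "h", "a", "r"] ||
  stack == ["b", "o", "o", "l"] || stack == ["f", "l", "o", "a", "t"]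

-- ===== PRECONDITION & SPEC =====
def Spec_isType (stack : List String) (out : Bool) : Prop := out = isType_alt stack
instance (stack : List String) (out : Bool) : Decidable (Spec_isType stack out) := by unfold Spec_isType; infer_instance

-- ===== CLAIM (what is proved, stated in full; the proofs are below) =====
def Claim_equal_isType : Prop := ∀ (stack : List String), Dom_isType stack → Spec_isType stack (isType stack)

-- ===== LEMMAS AND PROOFS =====
-- characterize, for each reachable state, which suffixes lead the loop to "T13"
theorem loop_T13 (l : List String) : isTypeLoop l "T13" = "T13" ↔ l = [] := by
  cases l with
  | nil => simp [isTypeLoop]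
  | cons h t => simp [isTypeLoop]

theorem loop_T5 (l : List String) : isTypeLoop l "T5" = "T13" ↔ l = ["t"] := by
  cases l with
  | nil => simp [isTypeLoop]
  | cons h t =>
    by_cases hh : h = "t" <;> simp [isTypeLoop, hh, loop_T13]

theorem loop_T9 (l : List String) : isTypeLoop l "T9" = "T13" ↔ l = ["r"] := by
  cases l with
  | nil => simp [isTypeLoop]
  | cons h t =>
    by_cases hh : h = "r" <;> simp [isTypeLoop, hh, loop_T13]

theorem loop_T10 (l : List String) : isTypeLoop l "T10" = "T13" ↔ l = ["l"] := by
  cases l with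
  | nil => simp [isTypeLoop]
  | cons h t =>
    by_cases hh : h = "l" <;> simp [isTypeLoop, hh, loop_T13]

theorem loop_T12 (l : List String) : isTypeLoop l "T12" = "T13" ↔ l = ["t"] := by
  cases l with
  | nil => simp [isTypeLoop]
  | cons h t =>
    by_cases hh : h = "t" <;> simp [isTypeLoop, hh, loop_T13]

theorem loop_T6 (l : List String) : isTypeLoop l "T6" = "T13" ↔ l = ["a", "r"] := by
  cases l with
  | nil => simp [isTypeLoop]
  | cons h t =>
    by_cases hh : h = "a" <;> simp [isTypeLoop, hh, loop_T9]

theorem loop_T7 (l : List String) : isTypeLoop l "T7" = "T13" ↔ l = ["o", "l"] := by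
  cases l with
  | nil => simp [isTypeLoop]
  | cons h t =>
    by_cases hh : h = "o" <;> simp [isTypeLoop, hh, loop_T10]

theorem loop_T11 (l : List String) : isTypeLoop l "T11" = "T13" ↔ l = ["a", "t"] := by
  cases l with
  | nil => simp [isTypeLoop]
  | cons h t =>
    by_cases hh : h = "a" <;> simp [isTypeLoop, hh, loop_T12]

theorem loop_T8 (l : List String) : isTypeLoop l "T8" = "T13" ↔ l = ["o", "a", "t"] := by
  cases l with
  | nil => simp [isTypeLoop]
  | cons h t =>
    by_cases hh : h = "o" <;> simp [isTypeLoop, hh, loop_T11]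

theorem loop_T1 (l : List String) : isTypeLoop l "T1" = "T13" ↔ l = ["n", "t"] := by
  cases l with
  | nil => simp [isTypeLoop]
  | cons h t =>
    by_cases hh : h = "n" <;> simp [isTypeLoop, hh, loop_T5]

theorem loop_T2 (l : List String) : isTypeLoop l "T2" = "T13" ↔ l = ["h", "a", "r"] := by
  cases l with
  | nil => simp [isTypeLoop]
  | cons h t =>
    by_cases hh : h = "h" <;> simp [isTypeLoop, hh, loop_T6]

theorem loop_T3 (l : List String) : isTypeLoop l "T3" = "T13" ↔ l = ["o", "o", "l"] := by
  cases l with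
  | nil => simp [isTypeLoop]
  | cons h t =>
    by_cases hh : h = "o" <;> simp [isTypeLoop, hh, loop_T7]

theorem loop_T4 (l : List String) : isTypeLoop l "T4" = "T13" ↔ l = ["l", "o", "a", "t"] := by
  cases l with
  | nil => simp [isTypeLoop]
  | cons h t =>
    by_cases hh : h = "l" <;> simp [isTypeLoop, hh, loop_T8]

theorem loop_T0 (l : List String) :
    isTypeLoop l "T0" = "T13" ↔
      l = ["i", "n", "t"] ∨ l = ["c", "h", "a", "r"] ∨
      l = ["b", "o", "o", "l"] ∨ l = ["f", "l", "o", "a", "t"] := by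
  cases l with
  | nil => simp [isTypeLoop]
  | cons h t =>
    by_cases h1 : h = "i"
    · simp [isTypeLoop, h1, loop_T1]
    · by_cases h2 : h = "c"
      · simp [isTypeLoop, h2, loop_T2]
      · by_cases h3 : h = "b"
        · simp [isTypeLoop, h3, loop_T3]
        · by_cases h4 : h = "f"
          · simp [isTypeLoop, h4, loop_T4]
          · simp [isTypeLoop, h1, h2, h3, h4]

-- ===== VERDICT (by name: the statement is the Claim_ definition above) =====
theorem isType_spec : Claim_equal_isType := by
  intro stack _
  unfold Spec_isType isType isType_alt
  by_cases h : isTypeLoop stack "T0" = "T13"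
  · rcases (loop_T0 stack).mp h with h' | h' | h' | h' <;> subst h' <;> decide
  · have := (loop_T0 stack).not.mp h
    push Not at this
    obtain ⟨a1, a2, a3, a4⟩ := this
    simp [h, a1, a2, a3, a4]
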